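-- pv_equiv track=rewrite | github.com/SixingYan/Sketch-for-Data-Stream | experiment/q4_draw.py | RelativeBias
-- ===== SOURCE A (Python) =====
-- increase = 30
--
-- def RelativeBias(expectOpt, trueOpt, OElist):
--     #
--     h1Range = [(OElist[i]+1)*increase for i in range(len(OElist))]
--     expectOE = 0
--     trueOE = 0
--     for i in range(len(OElist)):
--         if h1Range[i] > expectOpt:
--             expectOE = OElist[i]
--             break
--     for i in range(len(OElist)):
--         if h1Range[i] > trueOpt:
--             trueOE = OElist[i]
--             break
--     #rbPrecent = abs(trueOpt-expectOpt)/trueOpt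
--     return expectOE, trueOE #rbPrecent#, rbOE
-- ===== SOURCE B (Python) =====
-- increase = 30
--
-- def RelativeBias(expectOpt, trueOpt, OElist):
--     expectOE = 0
--     trueOE = 0
--     found_expect = False
--     found_true = False
--     for x in OElist:
--         s = (x + 1) * increase
--         if not found_expect and s > expectOpt:
--             expectOE = x
--             found_expect = True
--         if not found_true and s > trueOpt:
--             trueOE = x
--             found_true = True
--         if found_expect and found_true:
--             break
--     return expectOE, trueOE
-- ===== Notes on version B (the rewrite author's own statement) =====
-- stated objective: faster
-- what changed: Replaces the intermediate h1Range list and the two separate index scans with a single forward pass over OElist carrying two found-flags, breaking once both thresholds have been matched.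
import Mathlib
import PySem

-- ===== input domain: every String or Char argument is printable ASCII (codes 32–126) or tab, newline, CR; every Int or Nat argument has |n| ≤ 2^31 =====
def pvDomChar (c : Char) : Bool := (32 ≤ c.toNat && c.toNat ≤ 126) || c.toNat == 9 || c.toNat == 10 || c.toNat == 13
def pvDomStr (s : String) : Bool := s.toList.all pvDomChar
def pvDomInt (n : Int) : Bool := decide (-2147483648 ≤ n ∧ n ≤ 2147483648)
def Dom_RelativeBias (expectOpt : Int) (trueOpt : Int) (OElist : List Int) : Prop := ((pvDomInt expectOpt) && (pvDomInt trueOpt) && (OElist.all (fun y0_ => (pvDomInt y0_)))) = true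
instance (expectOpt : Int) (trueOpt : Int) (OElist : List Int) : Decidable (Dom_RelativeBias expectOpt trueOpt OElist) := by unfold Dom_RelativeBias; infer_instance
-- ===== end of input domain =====

-- B: one forward pass with two found-flags instead of an h1Range list and two index scans (simpler; same cost).
-- ===== PORT A =====
-- the for-loop with break: walks h1Range and OElist in lockstep, returns OElist[i] at the first h1Range[i] > opt, else the 0 default
def pvScanA (h1 oe : List Int) (opt : Int) : Int :=
  match h1, oe with
  | h :: hs, x :: xs => if h > opt then x else pvScanA hs xs opt
  | _, _ => 0

def RelativeBias (expectOpt : Int) (trueOpt : Int) (OElist : List Int) : Int × Int :=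
  let h1Range := OElist.map (fun x => (x + 1) * 30)
  (pvScanA h1Range OElist expectOpt, pvScanA h1Range OElist trueOpt)

-- ===== PORT B =====
def pvGoB (expectOpt trueOpt : Int) (l : List Int) (expectOE trueOE : Int) (fe ft : Bool) : Int × Int :=
  match l with
  | [] => (expectOE, trueOE)
  | x :: xs =>
    let s := (x + 1) * 30
    let eOE' := if !fe && s > expectOpt then x else expectOE
    let fe' := if !fe && s > expectOpt then true else fe
    let tOE' := if !ft && s > trueOpt then x else trueOE
    let ft' := if !ft && s > trueOpt then true else ft
    if fe' && ft' then (eOE', tOE') else pvGoB expectOpt trueOpt xs eOE' tOE' fe' ft'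

def RelativeBias_alt (expectOpt : Int) (trueOpt : Int) (OElist : List Int) : Int × Int :=
  pvGoB expectOpt trueOpt OElist 0 0 false false

-- ===== PRECONDITION & SPEC =====
def Spec_RelativeBias (expectOpt : Int) (trueOpt : Int) (OElist : List Int) (out : Int × Int) : Prop := out = RelativeBias_alt expectOpt trueOpt OElist
instance (expectOpt : Int) (trueOpt : Int) (OElist : List Int) (out : Int × Int) : Decidable (Spec_RelativeBias expectOpt trueOpt OElist out) := by unfold Spec_RelativeBias; infer_instance

-- ===== CLAIM (what is proved, stated in full; the proofs are below) =====
def Claim_equal_RelativeBias : Prop := ∀ (expectOpt : Int) (trueOpt : Int) (OElist : List Int), Dom_RelativeBias expectOpt trueOpt OElist → Spec_RelativeBias expectOpt trueOpt OElist (RelativeBias expectOpt trueOpt OElist)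

-- ===== LEMMAS AND PROOFS =====

-- ===== VERDICT (by name: the statement is the Claim_ definition above) =====
theorem pvGoB_spec (e t : Int) (l : List Int) (eOE tOE : Int) (fe ft : Bool)
    (he : fe = false → eOE = 0) (ht : ft = false → tOE = 0) :
    pvGoB e t l eOE tOE fe ft =
      ((if fe then eOE else pvScanA (l.map (fun x => (x + 1) * 30)) l e),
       (if ft then tOE else pvScanA (l.map (fun x => (x + 1) * 30)) l t)) := by
  induction l generalizing eOE tOE fe ft with
  | nil => cases fe <;> cases ft <;> simp_all [pvGoB, pvScanA]
  | cons x xs ih =>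
    cases fe <;> cases ft <;>
      simp only [pvGoB, pvScanA, List.map, Bool.not_true, Bool.not_false, Bool.false_and,
        Bool.true_and, if_true] <;>
      split_ifs <;> simp_all [ih]

theorem RelativeBias_spec : Claim_equal_RelativeBias := by
  intro e t l _
  unfold Spec_RelativeBias RelativeBias RelativeBias_alt
  simp [pvGoB_spec]
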